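-- pv_equiv track=rewrite | github.com/git-arya-4/X-NIDS | features/feature_extractor.py | _geo_for
-- ===== SOURCE A (Python) =====
-- _GEO_HINTS = {
--     range(1, 10):   "US",   range(13, 16):  "EU",  range(17, 18):  "US",
--     range(20, 24):  "US",   range(31, 38):  "EU",  range(41, 42):  "ZA",
--     range(43, 44):  "JP",   range(49, 50):  "JP",  range(58, 62):  "CN",
--     range(72, 77):  "US",   range(80, 86):  "EU",  range(88, 92):  "EU",
--     range(101, 112):"CN",   range(112, 120):"JP",  range(125, 126):"KR",
--     range(136, 143):"EU",   range(142, 145):"US",  range(150, 156):"AU",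
--     range(157, 162):"US",   range(163, 170):"CN",  range(176, 180):"EU",
--     range(185, 189):"EU",   range(192, 200):"US",  range(200, 212):"SA",
--     range(212, 224):"EU",
-- }
--
-- def _geo_for(ip_str):
--     """Best-effort offline country code from the first octet."""
--     try:
--         first = int(ip_str.split(".")[0])
--         for rng, cc in _GEO_HINTS.items():
--             if first in rng:
--                 return cc
--     except Exception:
--         pass
--     return "Unknown"
-- ===== SOURCE B (Python) =====
-- _GEO_HINTS = {
--     range(1, 10):   "US",   range(13, 16):  "EU",  range(17, 18):  "US",
--     range(20, 24):  "US",   range(31, 38):  "EU",  range(41, 42):  "ZA",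
--     range(43, 44):  "JP",   range(49, 50):  "JP",  range(58, 62):  "CN",
--     range(72, 77):  "US",   range(80, 86):  "EU",  range(88, 92):  "EU",
--     range(101, 112):"CN",   range(112, 120):"JP",  range(125, 126):"KR",
--     range(136, 143):"EU",   range(142, 145):"US",  range(150, 156):"AU",
--     range(157, 162):"US",   range(163, 170):"CN",  range(176, 180):"EU",
--     range(185, 189):"EU",   range(192, 200):"US",  range(200, 212):"SA",
--     range(212, 224):"EU",
-- }
--
-- # Built once at import: paint a 256-slot canvas in REVERSE priority order (earlier,
-- # higher-priority ranges overwrite later ones), then run-length-encode it into sorted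
-- # disjoint segments; each call binary-searches the segment starts instead of scanning ranges.
-- _paint = ["Unknown"] * 256
-- for _rng, _cc in reversed(list(_GEO_HINTS.items())):
--     for _o in _rng:
--         _paint[_o] = _cc
-- _STARTS = [0]
-- _CODES = [_paint[0]]
-- for _o in range(1, 256):
--     if _paint[_o] != _CODES[-1]:
--         _STARTS.append(_o)
--         _CODES.append(_paint[_o])
--
-- def _geo_for(ip_str):
--     """Best-effort offline country code from the first octet."""
--     try:
--         first = int(ip_str.split(".")[0])
--     except Exception:
--         return "Unknown"
--     if first < 0 or first > 255:
--         return "Unknown"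
--     lo, hi = 0, len(_STARTS) - 1
--     while lo < hi:  # find the last segment start <= first
--         mid = (lo + hi + 1) // 2
--         if _STARTS[mid] <= first:
--             lo = mid
--         else:
--             hi = mid - 1
--     return _CODES[lo]
-- ===== Notes on version B (the rewrite author's own statement) =====
-- stated objective: alternative
-- what changed: At import the range table is painted onto a 256-slot canvas in reverse priority order and run-length-encoded into sorted disjoint segments; each call then binary-searches the segment starts (with a 0..255 guard) instead of linearly scanning the 25 ranges.
import Mathlib
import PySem

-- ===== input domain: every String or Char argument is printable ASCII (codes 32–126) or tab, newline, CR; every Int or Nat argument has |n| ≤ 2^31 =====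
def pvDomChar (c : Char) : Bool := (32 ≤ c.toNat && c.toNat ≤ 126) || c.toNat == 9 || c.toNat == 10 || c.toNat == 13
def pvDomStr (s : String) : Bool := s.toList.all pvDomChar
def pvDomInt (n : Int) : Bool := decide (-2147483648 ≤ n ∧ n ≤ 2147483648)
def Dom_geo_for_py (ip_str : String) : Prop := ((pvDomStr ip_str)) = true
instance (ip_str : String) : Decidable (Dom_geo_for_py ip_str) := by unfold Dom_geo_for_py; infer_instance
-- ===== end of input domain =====

-- B replaces A's per-call linear scan over the range dict by a binary search over
-- sorted disjoint segments precomputed once (reverse-priority paint + run-length encode);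
-- return value only, no side effects.

-- ===== PORT A =====
-- _GEO_HINTS as a list of (lo, hi, cc): range(lo, hi) ↦ cc, in the dict's insertion order
def geoHints : List (Int × Int × String) :=
  [(1,10,"US"),(13,16,"EU"),(17,18,"US"),(20,24,"US"),(31,38,"EU"),(41,42,"ZA"),
   (43,44,"JP"),(49,50,"JP"),(58,62,"CN"),(72,77,"US"),(80,86,"EU"),(88,92,"EU"),
   (101,112,"CN"),(112,120,"JP"),(125,126,"KR"),(136,143,"EU"),(142,145,"US"),
   (150,156,"AU"),(157,162,"US"),(163,170,"CN"),(176,180,"EU"),(185,189,"EU"),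
   (192,200,"US"),(200,212,"SA"),(212,224,"EU")]

-- the 'for rng, cc in _GEO_HINTS.items(): if first in rng: return cc' loop
def geoScan (n : Int) : List (Int × Int × String) → Option String
  | [] => none
  | (lo, hi, cc) :: rest => if lo ≤ n ∧ n < hi then some cc else geoScan n rest

def geo_for_py (ip_str : String) : String :=
  match PySem.Str.split? ip_str "." with
  | none => "Unknown"          -- unreachable: sep ≠ ""
  | some parts =>
  match PySem.List.pyGet? parts 0 with
  | none => "Unknown"          -- IndexError would be caught by 'except' (split is never empty)
  | some s =>
    match PySem.Int.ofStr? s with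
    | none => "Unknown"        -- int() ValueError caught by 'except'
    | some first =>
      match geoScan first geoHints with
      | some cc => cc
      | none => "Unknown"      -- loop fell through

-- ===== PORT B =====
-- _paint: 256-slot canvas painted in reverse priority order (earlier ranges overwrite later)
-- octets from pyRange are always in 0..255 here, so '.toNat' on the index is exact
def geoPaint : List String :=
  geoHints.reverse.foldl
    (fun p r => (PySem.List.pyRange r.1 r.2.1 1).foldl (fun p o => p.set o.toNat r.2.2) p)
    (List.replicate 256 "Unknown")

-- run-length encode the canvas into (_STARTS, _CODES); indices 0..255 are in range,
-- so getD's default is never used ([-1] = getLast!)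
def geoRLE : List Int × List String :=
  (PySem.List.pyRange 1 256 1).foldl
    (fun sc o =>
      if geoPaint.getD o.toNat "Unknown" ≠ sc.2.getLast! then
        (sc.1 ++ [o], sc.2 ++ [geoPaint.getD o.toNat "Unknown"])
      else sc)
    ([0], [geoPaint.getD 0 "Unknown"])

def geoStarts : List Int := geoRLE.1
def geoCodes : List String := geoRLE.2

-- the 'while lo < hi' binary search; fuel only makes it total (the interval halves each
-- step, so fuel = geoStarts.length always suffices); _STARTS[mid] index is always in range
def bsLoop (first : Int) : Nat → Nat → Nat → Nat
  | 0, lo, _ => lo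
  | fuel+1, lo, hi =>
    if lo < hi then
      let mid := (lo + hi + 1) / 2
      if geoStarts.getD mid 0 ≤ first then bsLoop first fuel mid hi
      else bsLoop first fuel lo (mid - 1)
    else lo

def geo_for_py_alt (ip_str : String) : String :=
  match PySem.Str.split? ip_str "." with
  | none => "Unknown"          -- unreachable: sep ≠ ""
  | some parts =>
  match PySem.List.pyGet? parts 0 with
  | none => "Unknown"          -- IndexError caught by 'except'
  | some s =>
    match PySem.Int.ofStr? s with
    | none => "Unknown"        -- int() ValueError caught by 'except'
    | some first =>
      if first < 0 ∨ 255 < first then "Unknown"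
      else geoCodes.getD (bsLoop first geoStarts.length 0 (geoStarts.length - 1)) "Unknown"

-- ===== PRECONDITION & SPEC =====
def Spec_geo_for_py (ip_str : String) (out : String) : Prop := out = geo_for_py_alt ip_str
instance (ip_str : String) (out : String) : Decidable (Spec_geo_for_py ip_str out) := by unfold Spec_geo_for_py; infer_instance

-- ===== CLAIM (what is proved, stated in full; the proofs are below) =====
def Claim_equal_geo_for_py : Prop := ∀ (ip_str : String), Dom_geo_for_py ip_str → Spec_geo_for_py ip_str (geo_for_py ip_str)

-- ===== LEMMAS AND PROOFS =====

-- the scan returns none when no range matches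
lemma geoScan_none (n : Int) (l : List (Int × Int × String))
    (h : ∀ r ∈ l, ¬(r.1 ≤ n ∧ n < r.2.1)) : geoScan n l = none := by
  induction l with
  | nil => rfl
  | cons r rest ih =>
    obtain ⟨lo, hi, cc⟩ := r
    simp only [geoScan]
    rw [if_neg (show ¬(lo ≤ n ∧ n < hi) from h (lo, hi, cc) (by simp))]
    exact ih fun r hr => h r (List.mem_cons_of_mem _ hr)

-- every range bound of the hints lies in [1, 224)
set_option maxRecDepth 4000 in
lemma geoHints_bounds : ∀ r ∈ geoHints, 1 ≤ r.1 ∧ r.2.1 ≤ 224 := by decide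

-- scan result and B's binary-search lookup agree on every octet value 0..255
set_option maxRecDepth 100000 in
set_option maxHeartbeats 4000000 in
lemma lookup_agree_small : ∀ k ∈ List.range 256,
    (match geoScan (k : Int) geoHints with
     | some cc => cc
     | none => "Unknown") =
    geoCodes.getD (bsLoop (k : Int) geoStarts.length 0 (geoStarts.length - 1)) "Unknown" := by
  decide

-- scan and B's guarded lookup agree on every integer
lemma lookup_agree (n : Int) :
    (match geoScan n geoHints with
     | some cc => cc
     | none => "Unknown") =
    (if n < 0 ∨ 255 < n then "Unknown"
     else geoCodes.getD (bsLoop n geoStarts.length 0 (geoStarts.length - 1)) "Unknown") := by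
  by_cases h : n < 0 ∨ 255 < n
  · rw [if_pos h,
      geoScan_none n geoHints (fun r hr => by have := geoHints_bounds r hr; omega)]
  · rw [if_neg h]
    have hn : n = ((n.toNat : Nat) : Int) := by omega
    rw [hn]
    exact lookup_agree_small n.toNat (List.mem_range.mpr (by omega))

-- ===== VERDICT (by name: the statement is the Claim_ definition above) =====
theorem geo_for_py_spec : Claim_equal_geo_for_py := by
  intro ip_str _
  unfold Spec_geo_for_py geo_for_py geo_for_py_alt
  cases hp : PySem.Str.split? ip_str "." with
  | none => rfl
  | some parts =>
    cases hg : PySem.List.pyGet? parts 0 with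
    | none => simp only [hg]
    | some s =>
      cases ho : PySem.Int.ofStr? s with
      | none => simp only [hg, ho]
      | some first => simp only [hg, ho]; exact lookup_agree first
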